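-- pv_equiv track=rewrite | github.com/antko33/autoresolver | app/resolver.py | group_ips_in_subnets
-- ===== SOURCE A (Python) =====
-- def group_ips_in_subnets(ips):
--     subnets = set()
--
--     octet_groups = {}
--     for ip in list(ips):
--         key = ".".join(ip.split(".")[:3])  # Группировка по первым трем октетам
--         if key not in octet_groups:
--             octet_groups[key] = []
--         octet_groups[key].append(ip)
--
--         # IP-адреса с совпадающими первыми тремя октетами
--         network_24 = {
--             key + ".0" for key, group in octet_groups.items() if len(group) > 1
--         }  # Базовый IP для /24 подсетей
--         # Удаляем IP с совпадающими первыми тремя октетами из множества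
--         ips -= {ip for group in octet_groups.values() if len(group) > 1 for ip in group}
--         # Оставляем только IP без указания маски для /24 и одиночных IP
--         subnets.update(ips)  # IP без маски для одиночных IP
--         subnets.update(network_24)  # Базовые IP для /24 подсетей
--
--     return subnets
-- ===== SOURCE B (Python) =====
-- def group_ips_in_subnets(ips):
--     # Single pass: count IPs per 3-octet prefix; a prefix's base IP is recorded
--     # the moment its count reaches 2.  (Return value only: unlike A, this does
--     # not remove the grouped IPs from the caller's set.)
--     counts = {}
--     bases = set()
--     for ip in ips:
--         key = ".".join(ip.split(".")[:3])
--         c = counts.get(key, 0) + 1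
--         counts[key] = c
--         if c == 2:
--             bases.add(key + ".0")
--     return set(ips) | bases
-- ===== Notes on version B (the rewrite author's own statement) =====
-- stated objective: faster
-- what changed: A re-derives the /24 bases and re-subtracts/re-unions whole sets inside every loop iteration (quadratic); B makes one pass keeping a per-prefix counter, records a base when a prefix's count reaches 2, and returns set(ips) | bases; B also does not mutate the caller's set (return value equivalence only).
import Mathlib
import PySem

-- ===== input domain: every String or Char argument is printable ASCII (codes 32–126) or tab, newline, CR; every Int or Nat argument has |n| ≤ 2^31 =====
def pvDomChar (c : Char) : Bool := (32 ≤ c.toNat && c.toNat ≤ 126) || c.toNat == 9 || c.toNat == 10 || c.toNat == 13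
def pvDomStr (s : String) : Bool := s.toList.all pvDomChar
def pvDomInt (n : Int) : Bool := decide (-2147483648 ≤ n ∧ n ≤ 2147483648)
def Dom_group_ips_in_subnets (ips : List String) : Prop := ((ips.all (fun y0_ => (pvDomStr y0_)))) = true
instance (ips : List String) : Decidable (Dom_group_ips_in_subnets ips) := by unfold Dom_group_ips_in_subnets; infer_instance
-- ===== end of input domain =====

-- B replaces A's per-iteration set rebuilding by one counting pass; equivalence is about the
-- RETURN value only (Python A additionally empties the caller's set of the grouped IPs).

-- ===== PORT A =====
-- key = ".".join(ip.split(".")[:3])   (sep "." ≠ "", so split? is always `some`; the .getD [] default is never used)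
def pvKey (ip : String) : String :=
  PySem.Str.join "." (PySem.List.slice ((PySem.Str.split? ip ".").getD []) none (some 3))

-- one iteration of A's loop body over the state (subnets, octet_groups, ips)
def pvStepA (st : PySem.Set String × PySem.Dict String (List String) × List String)
    (ip : String) : PySem.Set String × PySem.Dict String (List String) × List String :=
  let subnets := st.1
  let groups := st.2.1
  let ipsv := st.2.2
  let key := pvKey ip
  let groups := if groups.contains key then groups else groups.insert key ([] : List String)
  let groups := groups.modify key [] (fun g => g ++ [ip])
  let network24 : PySem.Set String :=
    PySem.Set.ofList (((groups.items.filter (fun kg => kg.2.length > 1)).map (fun kg => kg.1 ++ ".0")))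
  let ipsv := PySem.Set.diff ipsv
    (PySem.Set.ofList (((groups.values.filter (fun g => g.length > 1)).flatten)))
  let subnets := PySem.Set.update subnets ipsv
  let subnets := PySem.Set.update subnets network24
  (subnets, groups, ipsv)

def group_ips_in_subnets (ips : List String) : List String :=
  (ips.foldl pvStepA (PySem.Set.empty, PySem.Dict.empty, ips)).1

-- ===== PORT B =====
-- one iteration of B's loop body over the state (counts, bases)
def pvStepB (st : PySem.Dict String Int × PySem.Set String) (ip : String) :
    PySem.Dict String Int × PySem.Set String :=
  let counts := st.1
  let bases := st.2
  let key := pvKey ip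
  let c := counts.getD key 0 + 1
  let counts := counts.insert key c
  let bases := if c == 2 then PySem.Set.add bases (key ++ ".0") else bases
  (counts, bases)

def group_ips_in_subnets_alt (ips : List String) : List String :=
  PySem.Set.union (PySem.Set.ofList ips) (ips.foldl pvStepB (PySem.Dict.empty, PySem.Set.empty)).2

-- ===== PRECONDITION & SPEC =====
def Spec_group_ips_in_subnets (ips : List String) (out : List String) : Prop := out = group_ips_in_subnets_alt ips
instance (ips : List String) (out : List String) : Decidable (Spec_group_ips_in_subnets ips out) := by unfold Spec_group_ips_in_subnets; infer_instance

-- ===== CLAIM (what is proved, stated in full; the proofs are below) =====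
def Claim_equal_group_ips_in_subnets : Prop := ∀ (ips : List String), Dom_group_ips_in_subnets ips → Spec_group_ips_in_subnets ips (group_ips_in_subnets ips)

-- ===== LEMMAS AND PROOFS =====

-- appending ".0" is injective on strings
theorem pvDotZero_inj (a b : String) (h : a ++ ".0" = b ++ ".0") : a = b := by
  have h2 := congrArg String.toList h
  simp at h2
  exact String.toList_inj.mp h2

-- the invariant tying A's loop state (S, G, I) to B's loop state (C, B) after ≥ 1 iterations
def pvInv (ips0 : List String) (S : PySem.Set String) (G : PySem.Dict String (List String))
    (I : List String) (C : PySem.Dict String Int) (B : PySem.Set String) : Prop :=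
  S = PySem.Set.update (PySem.Set.ofList ips0) B ∧
  (∀ k, ((G.getD k []).length : Int) = C.getD k 0) ∧
  (∀ x ∈ I, x ∈ ips0) ∧
  (∀ x, x ∈ B ↔ ∃ k, 2 ≤ C.getD k 0 ∧ x = k ++ ".0") ∧
  G.keys.Nodup

-- update by a list of already-present elements is the identity
theorem pvUpdate_all_mem {s : PySem.Set String} {xs : List String}
    (h : ∀ y ∈ xs, y ∈ s) : PySem.Set.update s xs = s := by
  rw [PySem.Set.update_eq_append_filter]
  have : (PySem.Set.ofList xs).filter (fun y => !s.contains y) = [] := by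
    rw [List.filter_eq_nil_iff]
    intro y hy
    have hy' : y ∈ xs := (PySem.Set.mem_ofList xs y).mp hy
    simp [h y hy']
  rw [this, List.append_nil]

-- a nodup list whose elements all lie in s except the present x filters down to [x]
theorem pvFilter_single (s : PySem.Set String) (x : String) :
    ∀ (l : List String), l.Nodup → x ∈ l → x ∉ s → (∀ y ∈ l, y ∈ s ∨ y = x) →
      l.filter (fun y => !s.contains y) = [x] := by
  intro l
  induction l with
  | nil => intro _ hx; cases hx
  | cons z t ih =>
    intro hnd hx hxs hall
    rcases List.mem_cons.mp hx with rfl | hz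
    · simp only [List.filter_cons]
      rw [if_pos (by simp [hxs])]
      have ht : t.filter (fun y => !s.contains y) = [] := by
        rw [List.filter_eq_nil_iff]
        intro y hy
        have hyz : y ≠ x := fun e => (List.nodup_cons.mp hnd).1 (e ▸ hy)
        simp [(hall y (List.mem_cons_of_mem _ hy)).resolve_right hyz]
      rw [ht]
    · have hzs : z ∈ s := by
        rcases hall z List.mem_cons_self with h' | rfl
        · exact h'
        · exact absurd hz (List.nodup_cons.mp hnd).1
      simp only [List.filter_cons]
      rw [if_neg (by simp [hzs])]
      exact ih (List.nodup_cons.mp hnd).2 hz hxs (fun y hy => hall y (List.mem_cons_of_mem _ hy))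

-- update by a list whose elements are all in s except (possibly) x, with x present, is add
theorem pvUpdate_one_new {s : PySem.Set String} {xs : List String} {x : String}
    (hx : x ∈ xs) (h : ∀ y ∈ xs, y ∈ s ∨ y = x) :
    PySem.Set.update s xs = PySem.Set.add s x := by
  by_cases hxs : x ∈ s
  · rw [PySem.Set.add_of_mem hxs]
    exact pvUpdate_all_mem (fun y hy => (h y hy).elim id (fun e => e ▸ hxs))
  · rw [PySem.Set.add_of_not_mem hxs, PySem.Set.update_eq_append_filter]
    congr 1
    exact pvFilter_single s x (PySem.Set.ofList xs) (PySem.Set.nodup_ofList xs)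
      ((PySem.Set.mem_ofList xs x).mpr hx) hxs
      (fun y hy => h y ((PySem.Set.mem_ofList xs y).mp hy))

-- characterisation of the group dict after one body step
theorem pvGroups_getD (G : PySem.Dict String (List String)) (k : String) (ip : String) :
    ∀ k', (((if G.contains k then G else G.insert k ([] : List String)).modify k [] (fun g => g ++ [ip])).getD k' [])
      = if k' = k then G.getD k [] ++ [ip] else G.getD k' [] := by
  intro k'
  by_cases hc : G.contains k = true
  · rw [if_pos hc, PySem.Dict.getD_modify]
  · rw [if_neg hc, PySem.Dict.getD_modify]
    by_cases e : k' = k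
    · subst e
      rw [if_pos rfl, if_pos rfl, PySem.Dict.getD_insert_self,
        PySem.Dict.getD_of_not_contains G [] (by simpa using hc)]
    · rw [if_neg e, if_neg e, PySem.Dict.getD_insert_of_ne G [] [] e]

-- membership in the network_24 comprehension list, via the counts
theorem pvNetwork_mem (G : PySem.Dict String (List String)) (C : PySem.Dict String Int)
    (hnd : G.keys.Nodup) (hlen : ∀ k, ((G.getD k []).length : Int) = C.getD k 0) (x : String) :
    (x ∈ (G.items.filter (fun kg => kg.2.length > 1)).map (fun kg => kg.1 ++ ".0")) ↔
      ∃ k, 2 ≤ C.getD k 0 ∧ x = k ++ ".0" := by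
  constructor
  · intro hx
    rcases List.mem_map.mp hx with ⟨kg, hkg, rfl⟩
    rcases List.mem_filter.mp hkg with ⟨hmem, hgt⟩
    obtain ⟨k1, g1⟩ := kg
    have hget : G.getD k1 [] = g1 := PySem.Dict.getD_of_mem_items G hmem hnd []
    refine ⟨k1, ?_, rfl⟩
    have := hlen k1
    rw [hget] at this
    have hgt' : 1 < g1.length := by simpa using hgt
    omega
  · rintro ⟨k, hk, rfl⟩
    have := hlen k
    have hlen2 : 1 < (G.getD k []).length := by omega
    have hne : G.getD k [] ≠ [] := by
      intro e; rw [e] at hlen2; simp at hlen2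
    have hget : G.get? k = some (G.getD k []) := by
      rcases hget : G.get? k with _ | v
      · exact absurd (PySem.Dict.getD_of_get?_eq_none G [] hget) hne
      · rw [PySem.Dict.getD_of_get?_eq_some G [] hget]
    have hitems : (k, G.getD k []) ∈ G.items := PySem.Dict.mem_items_of_get?_eq_some G hget
    exact List.mem_map.mpr ⟨(k, G.getD k []), List.mem_filter.mpr ⟨hitems, by simpa using hlen2⟩, rfl⟩

-- one body step preserves the invariant
theorem pvStep_inv (ips0 : List String) (S : PySem.Set String) (G : PySem.Dict String (List String))
    (I : List String) (C : PySem.Dict String Int) (B : PySem.Set String) (ip : String)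
    (h : pvInv ips0 S G I C B) :
    pvInv ips0 (pvStepA (S, G, I) ip).1 (pvStepA (S, G, I) ip).2.1 (pvStepA (S, G, I) ip).2.2
      (pvStepB (C, B) ip).1 (pvStepB (C, B) ip).2 := by
  obtain ⟨hS, hlen, hI, hB, hnd⟩ := h
  simp only [pvStepA, pvStepB]
  set k := pvKey ip with hk
  set G2 := ((if G.contains k then G else G.insert k ([] : List String)).modify k [] (fun g => g ++ [ip])) with hG2
  set C2 := C.insert k (C.getD k 0 + 1) with hC2
  set B2 := (if (C.getD k 0 + 1) == 2 then PySem.Set.add B (k ++ ".0") else B) with hB2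
  -- the group lists after the step
  have hget2 : ∀ k', G2.getD k' [] = if k' = k then G.getD k [] ++ [ip] else G.getD k' [] :=
    pvGroups_getD G k ip
  have hlen2 : ∀ k', ((G2.getD k' []).length : Int) = C2.getD k' 0 := by
    intro k'
    rw [hget2 k', hC2, PySem.Dict.getD_insert]
    by_cases e : k' = k
    · rw [if_pos e, if_pos e, List.length_append, ← hlen k]
      simp only [List.length_cons, List.length_nil]
      push_cast; omega
    · rw [if_neg e, if_neg e]; exact hlen k'
  have hnd2 : G2.keys.Nodup := by
    rw [hG2, PySem.Dict.keys_modify]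
    by_cases hc : G.contains k = true
    · rw [if_pos hc]; exact PySem.Dict.nodup_keys_insert _ _ _ hnd
    · rw [if_neg hc]
      exact PySem.Dict.nodup_keys_insert _ _ _ (PySem.Dict.nodup_keys_insert _ _ _ hnd)
  have hc0 : (0 : Int) ≤ C.getD k 0 := by rw [← hlen k]; positivity
  -- the new bases characterisation
  have hB2c : ∀ x, x ∈ B2 ↔ ∃ k', 2 ≤ C2.getD k' 0 ∧ x = k' ++ ".0" := by
    intro x
    rw [hB2, hC2]
    by_cases h2 : C.getD k 0 + 1 = 2
    · rw [if_pos (by simpa using h2)]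
      rw [PySem.Set.mem_add]
      constructor
      · rintro (hx | rfl)
        · rcases (hB x).mp hx with ⟨k', hk', rfl⟩
          refine ⟨k', ?_, rfl⟩
          rw [PySem.Dict.getD_insert]
          by_cases e : k' = k
          · subst e; rw [if_pos rfl]; omega
          · rw [if_neg e]; exact hk'
        · exact ⟨k, by rw [PySem.Dict.getD_insert_self]; omega, rfl⟩
      · rintro ⟨k', hk', rfl⟩
        rw [PySem.Dict.getD_insert] at hk'
        by_cases e : k' = k
        · right; rw [e]
        · left; exact (hB _).mpr ⟨k', by rwa [if_neg e] at hk', rfl⟩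
    · rw [if_neg (by simpa using h2)]
      constructor
      · intro hx
        rcases (hB x).mp hx with ⟨k', hk', rfl⟩
        refine ⟨k', ?_, rfl⟩
        rw [PySem.Dict.getD_insert]
        by_cases e : k' = k
        · subst e; rw [if_pos rfl]; omega
        · rw [if_neg e]; exact hk'
      · rintro ⟨k', hk', rfl⟩
        rw [PySem.Dict.getD_insert] at hk'
        by_cases e : k' = k
        · subst e
          rw [if_pos rfl] at hk'
          exact (hB _).mpr ⟨k, by omega, rfl⟩
        · exact (hB _).mpr ⟨k', by rwa [if_neg e] at hk', rfl⟩
  have hNc := pvNetwork_mem G2 C2 hnd2 hlen2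
  refine ⟨?_, hlen2, ?_, hB2c, hnd2⟩
  · -- the subnets accumulator stays aligned
    have hdrop : PySem.Set.update S (PySem.Set.diff I
        (PySem.Set.ofList ((G2.values.filter (fun g => g.length > 1)).flatten))) = S := by
      apply pvUpdate_all_mem
      intro y hy
      have hyI : y ∈ I := ((PySem.Set.mem_diff I _ y).mp hy).1
      rw [hS, PySem.Set.mem_update]
      exact Or.inl ((PySem.Set.mem_ofList ips0 y).mpr (hI y hyI))
    rw [hdrop]
    by_cases h2 : C.getD k 0 + 1 = 2
    · -- a new /24 base appears: both sides add exactly k ++ ".0"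
      have hxB : (k ++ ".0") ∉ B := by
        intro hx
        rcases (hB _).mp hx with ⟨k', hk', he⟩
        have he' : k' = k := pvDotZero_inj k' k he.symm
        rw [he'] at hk'
        omega
      have hB2e : B2 = B ++ [k ++ ".0"] := by
        rw [hB2, if_pos (by simpa using h2)]
        exact PySem.Set.add_of_not_mem hxB
      have hupd : PySem.Set.update S (PySem.Set.ofList
          ((G2.items.filter (fun kg => kg.2.length > 1)).map (fun kg => kg.1 ++ ".0")))
            = PySem.Set.add S (k ++ ".0") := by
        apply pvUpdate_one_new
        · rw [PySem.Set.mem_ofList]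
          refine (hNc _).mpr ⟨k, ?_, rfl⟩
          rw [hC2, PySem.Dict.getD_insert_self]; omega
        · intro y hy
          rw [PySem.Set.mem_ofList] at hy
          rcases (hNc y).mp hy with ⟨k', hk', rfl⟩
          rw [hC2, PySem.Dict.getD_insert] at hk'
          by_cases e : k' = k
          · right; rw [e]
          · left
            rw [hS, PySem.Set.mem_update]
            exact Or.inr ((hB _).mpr ⟨k', by rwa [if_neg e] at hk', rfl⟩)
      rw [hupd, hB2e, hS, PySem.Set.update_append, PySem.Set.update_cons, PySem.Set.update_nil]
    · -- no new base: both sides are unchanged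
      have hupd : PySem.Set.update S (PySem.Set.ofList
          ((G2.items.filter (fun kg => kg.2.length > 1)).map (fun kg => kg.1 ++ ".0"))) = S := by
        apply pvUpdate_all_mem
        intro y hy
        rw [PySem.Set.mem_ofList] at hy
        rcases (hNc y).mp hy with ⟨k', hk', rfl⟩
        rw [hC2, PySem.Dict.getD_insert] at hk'
        rw [hS, PySem.Set.mem_update]
        refine Or.inr ((hB _).mpr ⟨k', ?_, rfl⟩)
        by_cases e : k' = k
        · rw [if_pos e] at hk'
          have : 2 ≤ C.getD k 0 := by omega
          rw [e]; exact this
        · rwa [if_neg e] at hk'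
      rw [hupd, hS]
      have hB2e : B2 = B := by rw [hB2, if_neg (by simpa using h2)]
      rw [hB2e]
  · -- remaining ips stay inside the original list
    intro x hx
    exact hI x ((PySem.Set.mem_diff I _ x).mp hx).1

-- the two loops stay aligned from any invariant state
theorem pvLoop (ips0 : List String) (rest : List String) :
    ∀ S G I C B, pvInv ips0 S G I C B →
      (rest.foldl pvStepA (S, G, I)).1 =
        PySem.Set.update (PySem.Set.ofList ips0) ((rest.foldl pvStepB (C, B)).2) := by
  induction rest with
  | nil => intro S G I C B h; exact h.1
  | cons ip t ih =>
    intro S G I C B h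
    have h' := pvStep_inv ips0 S G I C B ip h
    simpa using ih _ _ _ _ _ h'

-- after the first iteration (from the empty initial states) the invariant holds
theorem pvInit (ips0 : List String) (x : String) :
    pvInv ips0 (pvStepA (PySem.Set.empty, PySem.Dict.empty, ips0) x).1
      (pvStepA (PySem.Set.empty, PySem.Dict.empty, ips0) x).2.1
      (pvStepA (PySem.Set.empty, PySem.Dict.empty, ips0) x).2.2
      (pvStepB (PySem.Dict.empty, PySem.Set.empty) x).1
      (pvStepB (PySem.Dict.empty, PySem.Set.empty) x).2 := by
  simp only [pvStepA, pvStepB]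
  set k := pvKey x with hk
  set G2 := ((if (PySem.Dict.empty : PySem.Dict String (List String)).contains k then PySem.Dict.empty
      else PySem.Dict.empty.insert k ([] : List String)).modify k [] (fun g => g ++ [x])) with hG2
  set C2 := (PySem.Dict.empty : PySem.Dict String Int).insert k
      ((PySem.Dict.empty : PySem.Dict String Int).getD k 0 + 1) with hC2
  have hget2 : ∀ k', G2.getD k' [] = if k' = k then [x] else [] := by
    intro k'
    rw [hG2, pvGroups_getD]
    simp [PySem.Dict.getD_empty]
  have hlen2 : ∀ k', ((G2.getD k' []).length : Int) = C2.getD k' 0 := by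
    intro k'
    rw [hget2 k', hC2, PySem.Dict.getD_insert, PySem.Dict.getD_empty, PySem.Dict.getD_empty]
    by_cases e : k' = k
    · rw [if_pos e, if_pos e]; simp
    · rw [if_neg e, if_neg e]; simp
  have hnd2 : G2.keys.Nodup := by
    rw [hG2, PySem.Dict.keys_modify]
    rw [if_neg (by simp [PySem.Dict.contains_empty])]
    exact PySem.Dict.nodup_keys_insert _ _ _
      (PySem.Dict.nodup_keys_insert _ _ _ PySem.Dict.nodup_keys_empty)
  have hC2small : ∀ k', C2.getD k' 0 ≤ 1 := by
    intro k'
    rw [hC2, PySem.Dict.getD_insert, PySem.Dict.getD_empty, PySem.Dict.getD_empty]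
    by_cases e : k' = k
    · rw [if_pos e]; norm_num
    · rw [if_neg e]; norm_num
  have hB2 : (if ((PySem.Dict.empty : PySem.Dict String Int).getD k 0 + 1) == 2
      then PySem.Set.add PySem.Set.empty (k ++ ".0") else PySem.Set.empty) = PySem.Set.empty := by
    rw [if_neg (by simp [PySem.Dict.getD_empty])]
  rw [hB2]
  have hNc := pvNetwork_mem G2 C2 hnd2 hlen2
  refine ⟨?_, hlen2, ?_, ?_, hnd2⟩
  · -- the subnets set after the first iteration is exactly set(ips0)
    have hval : G2.values.filter (fun g => g.length > 1) = [] := by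
      rw [List.filter_eq_nil_iff]
      intro g hg
      rw [PySem.Dict.values_eq_map_keys G2 hnd2 []] at hg
      rcases List.mem_map.mp hg with ⟨k', _, rfl⟩
      rw [hget2 k']
      by_cases e : k' = k
      · rw [if_pos e]; simp
      · rw [if_neg e]; simp
    rw [hval]
    have hdiff : PySem.Set.diff ips0 (PySem.Set.ofList (List.flatten [])) = ips0 := by
      simp [PySem.Set.diff, PySem.Set.ofList_nil, PySem.Set.contains]
    rw [hdiff]
    have hbase : PySem.Set.update PySem.Set.empty ips0 = PySem.Set.ofList ips0 :=
      PySem.Set.update_nil_left ips0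
    rw [hbase,
      show PySem.Set.update (PySem.Set.ofList ips0) PySem.Set.empty = PySem.Set.ofList ips0 from
        PySem.Set.update_nil _]
    apply pvUpdate_all_mem
    intro y hy
    rw [PySem.Set.mem_ofList] at hy
    rcases (hNc y).mp hy with ⟨k', hk', _⟩
    exact absurd hk' (by have := hC2small k'; omega)
  · -- the remaining ips are among the original ones
    intro y hy
    exact ((PySem.Set.mem_diff ips0 _ y).mp hy).1
  · -- no base was recorded yet and no prefix has two members
    intro y
    constructor
    · intro hy; cases hy
    · rintro ⟨k', hk', rfl⟩
      exact absurd hk' (by have := hC2small k'; omega)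

-- ===== VERDICT (by name: the statement is the Claim_ definition above) =====
theorem group_ips_in_subnets_spec : Claim_equal_group_ips_in_subnets := by
  intro ips _
  unfold Spec_group_ips_in_subnets
  cases ips with
  | nil => rfl
  | cons x t =>
    simp only [group_ips_in_subnets, group_ips_in_subnets_alt, List.foldl_cons, PySem.Set.union]
    have h := pvLoop (x :: t) t _ _ _ _ _ (pvInit (x :: t) x)
    simpa only [Prod.mk.eta] using h
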